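-- pv_equiv track=rewrite | github.com/Andrew-Suber/project-euler | lib_project_euler.py | create_pentagon_numbers
-- ===== SOURCE A (Python) =====
-- def create_pentagon_numbers(limit):
--     """Return a set of pentagon numbers up to limit."""
--     pentagons = {0}
--     increment = 1
--     value = 0
--     while True:
--         value += increment
--         increment += 3
--         if value > limit:
--             break
--         pentagons.add(value)
--     return pentagons
-- ===== SOURCE B (Python) =====
-- def _isqrt(n):
--     # floor integer square root by binary search (n >= 0)
--     lo, hi = 0, n + 1
--     while hi - lo > 1:
--         mid = (lo + hi) // 2
--         if mid * mid <= n: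
--             lo = mid
--         else:
--             hi = mid
--     return lo
--
--
-- def create_pentagon_numbers(limit):
--     """Return a set of pentagon numbers up to limit."""
--     pentagons = {0}
--     if limit < 1:
--         return pentagons
--     r = _isqrt(24 * limit + 1)
--     n_max = (r + 1) // 6
--     pentagons.update(n * (3 * n - 1) // 2 for n in range(1, n_max + 1))
--     return pentagons
-- ===== Notes on version B (the rewrite author's own statement) =====
-- stated objective: alternative
-- what changed: Replaces A's additive while-loop recurrence (value += increment; increment += 3) by computing the count of pentagonal numbers <= limit in closed form via an integer square root (binary search on isqrt(24*limit+1)) and building the set with a comprehension over the index range using the formula n*(3*n-1)//2.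
import Mathlib
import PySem

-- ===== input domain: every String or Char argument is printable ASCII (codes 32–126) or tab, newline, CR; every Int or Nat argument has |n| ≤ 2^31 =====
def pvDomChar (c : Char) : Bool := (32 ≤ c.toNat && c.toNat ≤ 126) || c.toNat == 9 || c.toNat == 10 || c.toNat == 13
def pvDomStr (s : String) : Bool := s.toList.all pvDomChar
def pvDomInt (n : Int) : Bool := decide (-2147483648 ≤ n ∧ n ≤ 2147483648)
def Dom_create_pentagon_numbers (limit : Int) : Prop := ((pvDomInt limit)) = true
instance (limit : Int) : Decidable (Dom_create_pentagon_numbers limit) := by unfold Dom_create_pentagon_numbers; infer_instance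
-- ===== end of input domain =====

-- B replaces A's additive while-loop recurrence by a closed-form count (integer sqrt by
-- binary search) plus a comprehension over the index range; objective: alternative.

-- ===== PORT A =====
-- A's 'while True' loop; the extra proof argument 0 < increment only establishes
-- termination (value strictly grows), the computation is exactly A's.
def pentLoopA (limit : Int) (pentagons : List Int) (increment value : Int)
    (h : 0 < increment) : List Int :=
  let value' := value + increment
  if value' > limit then pentagons
  else pentLoopA limit (PySem.Set.add pentagons value') (increment + 3) value' (by omega)
termination_by (limit + 1 - value).toNat
decreasing_by simp only [gt_iff_lt, not_lt] at *; omega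

def create_pentagon_numbers (limit : Int) : List Int :=
  pentLoopA limit (PySem.Set.ofList [0]) 1 0 (by omega)

-- ===== PORT B =====
-- Source B's _isqrt: binary search for the floor square root
def isqrtLoopB (n lo hi : Int) : Int :=
  if h : hi - lo > 1 then
    let mid := PySem.Int.floordiv (lo + hi) 2
    if mid * mid ≤ n then isqrtLoopB n mid hi else isqrtLoopB n lo mid
  else lo
termination_by (hi - lo).toNat
decreasing_by
  all_goals
    have hb := PySem.Int.floordiv_two_mid_bounds (lo := lo) (hi := hi) (by omega)
    have h2 : PySem.Int.floordiv (lo + hi) 2 = (lo + hi) / 2 :=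
      PySem.Int.floordiv_eq_ediv_of_pos (by omega)
    simp only [h2] at hb ⊢
    omega

def isqrtB (n : Int) : Int := isqrtLoopB n 0 (n + 1)

def create_pentagon_numbers_alt (limit : Int) : List Int :=
  let pentagons := PySem.Set.ofList [0]
  if limit < 1 then pentagons
  else
    let r := isqrtB (24 * limit + 1)
    let n_max := PySem.Int.floordiv (r + 1) 6
    PySem.Set.update pentagons ((PySem.List.pyRange 1 (n_max + 1) 1).map
      (fun n => PySem.Int.floordiv (n * (3 * n - 1)) 2))

-- ===== PRECONDITION & SPEC =====
def Spec_create_pentagon_numbers (limit : Int) (out : List Int) : Prop := out = create_pentagon_numbers_alt limit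
instance (limit : Int) (out : List Int) : Decidable (Spec_create_pentagon_numbers limit out) := by unfold Spec_create_pentagon_numbers; infer_instance

-- ===== CLAIM (what is proved, stated in full; the proofs are below) =====
def Claim_equal_create_pentagon_numbers : Prop := ∀ (limit : Int), Dom_create_pentagon_numbers limit → Spec_create_pentagon_numbers limit (create_pentagon_numbers limit)

-- ===== LEMMAS AND PROOFS =====

-- the k-th pentagonal number, by A's recurrence
def pent : Nat → Int
  | 0 => 0
  | k + 1 => pent k + (3 * k + 1)

theorem pent_two_mul (k : Nat) : 2 * pent k = k * (3 * k - 1) := by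
  induction k with
  | zero => simp [pent]
  | succ k ih => simp only [pent]; push_cast at *; ring_nf at *; linarith

theorem pent_strictMono : StrictMono pent := by
  apply strictMono_nat_of_lt_succ
  intro k
  have : (0 : Int) ≤ k := by exact_mod_cast Nat.zero_le k
  simp only [pent]
  omega

-- A's loop characterized: at step k, with pent (k+1) .. pent m still to be added
theorem pentLoopA_eq (limit : Int) (m : Nat)
    (hm : limit < pent (m + 1)) (hmle : pent m ≤ limit) :
    ∀ k (S : List Int), k ≤ m → (∀ x ∈ S, x < pent (k + 1)) →
    pentLoopA limit S (3 * k + 1) (pent k) (by positivity) =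
      S ++ (List.range' (k + 1) (m - k)).map pent := by
  intro k S hk hS
  induction hn : m - k generalizing k S with
  | zero =>
    have hkm : k = m := by omega
    subst hkm
    rw [pentLoopA]
    have hv : pent k + (3 * (k : Int) + 1) = pent (k + 1) := by simp [pent]
    simp [hv, hm]
  | succ n ih =>
    rw [pentLoopA]
    have hv : pent k + (3 * (k : Int) + 1) = pent (k + 1) := by simp [pent]
    have hle : pent (k + 1) ≤ limit :=
      le_trans (pent_strictMono.le_iff_le.mpr (by omega : k + 1 ≤ m)) hmle
    have hnotmem : pent (k + 1) ∉ S := fun hmem => absurd (hS _ hmem) (lt_irrefl _)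
    have hadd : PySem.Set.add S (pent (k + 1)) = S ++ [pent (k + 1)] :=
      PySem.Set.add_of_not_mem hnotmem
    have hinc : (3 * (k : Int) + 1) + 3 = 3 * ((k + 1 : Nat) : Int) + 1 := by push_cast; ring
    have hS' : ∀ x ∈ S ++ [pent (k + 1)], x < pent (k + 1 + 1) := by
      intro x hx
      rcases List.mem_append.mp hx with h1 | h1
      · exact lt_trans (hS _ h1) (pent_strictMono (by omega))
      · simp at h1; subst h1; exact pent_strictMono (by omega)
    simp only [hv, hinc, hadd, not_lt.mpr hle]
    rw [ih (k + 1) (S ++ [pent (k + 1)]) (by omega) hS' (by omega)]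
    simp [List.range'_succ, List.append_assoc]

-- binary-search isqrt is the floor square root
theorem isqrtLoopB_spec (n : Int) : ∀ lo hi : Int, 0 ≤ lo → lo < hi →
    lo * lo ≤ n → n < hi * hi →
    0 ≤ isqrtLoopB n lo hi ∧ isqrtLoopB n lo hi * isqrtLoopB n lo hi ≤ n ∧
      n < (isqrtLoopB n lo hi + 1) * (isqrtLoopB n lo hi + 1) := by
  intro lo hi
  induction hd : (hi - lo).toNat using Nat.strong_induction_on generalizing lo hi with
  | _ d ih =>
  intro h0 hlh hlo hhi
  rw [isqrtLoopB]
  by_cases hgt : hi - lo > 1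
  · have h2 : PySem.Int.floordiv (lo + hi) 2 = (lo + hi) / 2 :=
      PySem.Int.floordiv_eq_ediv_of_pos (by omega)
    have hmlo : lo < PySem.Int.floordiv (lo + hi) 2 := by rw [h2]; omega
    have hmhi : PySem.Int.floordiv (lo + hi) 2 < hi := by rw [h2]; omega
    simp only [dif_pos hgt]
    by_cases hc : PySem.Int.floordiv (lo + hi) 2 * PySem.Int.floordiv (lo + hi) 2 ≤ n
    · simp only [if_pos hc]
      exact ih (hi - PySem.Int.floordiv (lo + hi) 2).toNat (by omega) _ hi rfl
        (by omega) hmhi hc hhi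
    · simp only [if_neg hc]
      exact ih (PySem.Int.floordiv (lo + hi) 2 - lo).toNat (by omega) lo _ rfl
        h0 hmlo hlo (by omega)
  · rw [dif_neg hgt]
    have : hi = lo + 1 := by omega
    subst this
    exact ⟨h0, hlo, hhi⟩

theorem isqrtB_spec (n : Int) (hn : 0 ≤ n) :
    0 ≤ isqrtB n ∧ isqrtB n * isqrtB n ≤ n ∧ n < (isqrtB n + 1) * (isqrtB n + 1) :=
  isqrtLoopB_spec n 0 (n + 1) le_rfl (by omega) (by omega) (by nlinarith)

theorem floordiv_pent (k : Nat) :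
    PySem.Int.floordiv ((k : Int) * (3 * (k : Int) - 1)) 2 = pent k := by
  rw [← pent_two_mul, PySem.Int.floordiv_eq_ediv_of_pos (by omega)]
  omega

-- ===== VERDICT (by name: the statement is the Claim_ definition above) =====
theorem create_pentagon_numbers_spec : Claim_equal_create_pentagon_numbers := by
  unfold Claim_equal_create_pentagon_numbers
  intro limit _
  unfold Spec_create_pentagon_numbers create_pentagon_numbers create_pentagon_numbers_alt
  by_cases hL : limit < 1
  · rw [pentLoopA]
    simp [hL]
  · -- limit ≥ 1
    rw [if_neg hL]
    simp only []          -- zeta-reduce the lets of the B port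
    push_neg at hL
    have hN : (0 : Int) ≤ 24 * limit + 1 := by omega
    obtain ⟨hr0, hrlo, hrhi⟩ := isqrtB_spec (24 * limit + 1) hN
    generalize hrdef : isqrtB (24 * limit + 1) = r at hr0 hrlo hrhi ⊢
    have h6 : PySem.Int.floordiv (r + 1) 6 = (r + 1) / 6 :=
      PySem.Int.floordiv_eq_ediv_of_pos (by omega)
    rw [h6]
    have hnm0 : 0 ≤ (r + 1) / 6 := by omega
    have hcast : ((((r + 1) / 6).toNat : Nat) : Int) = (r + 1) / 6 := Int.toNat_of_nonneg hnm0
    -- the key bracketing: for k ≥ 1, pent k ≤ limit ↔ k ≤ (r+1)/6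
    have key : ∀ k : Nat, 1 ≤ k → (pent k ≤ limit ↔ (k : Int) ≤ (r + 1) / 6) := by
      intro k hk1
      have hk : (1 : Int) ≤ (k : Int) := by exact_mod_cast hk1
      have h2p := pent_two_mul k
      constructor
      · intro hple
        have hkk : (k : Int) * (3 * k - 1) ≤ 2 * limit := by omega
        have hsq : (6 * (k : Int) - 1) * (6 * k - 1) ≤ 24 * limit + 1 := by nlinarith
        have h61 : 6 * (k : Int) - 1 ≤ r := by nlinarith
        omega
      · intro hknm
        have h61 : 6 * (k : Int) - 1 ≤ r := by omega
        have hsq : (6 * (k : Int) - 1) * (6 * k - 1) ≤ r * r := by nlinarith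
        have hkk : (k : Int) * (3 * k - 1) ≤ 2 * limit := by nlinarith
        omega
    have hmle : pent ((r + 1) / 6).toNat ≤ limit := by
      rcases Nat.eq_zero_or_pos ((r + 1) / 6).toNat with h | h
      · rw [h]; simp [pent]; omega
      · exact (key _ h).mpr (by omega)
    have hmlt : limit < pent (((r + 1) / 6).toNat + 1) := by
      by_contra hc
      push_neg at hc
      have := (key (((r + 1) / 6).toNat + 1) (by omega)).mp hc
      push_cast [hcast] at this
      omega
    -- A's side
    have hA := pentLoopA_eq limit ((r + 1) / 6).toNat hmlt hmle 0 (PySem.Set.ofList [0])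
      (Nat.zero_le _)
      (by intro x hx; simp [PySem.Set.ofList] at hx; subst hx; simp [pent])
    have h01 : pentLoopA limit (PySem.Set.ofList [0]) 1 0 (by omega) =
        pentLoopA limit (PySem.Set.ofList [0]) (3 * ((0 : Nat) : Int) + 1) (pent 0)
          (by positivity) := by
      norm_num [pent]
    rw [h01, hA]
    -- B's side
    have hrange : PySem.List.pyRange 1 ((r + 1) / 6 + 1) 1 =
        (List.range' 1 ((r + 1) / 6).toNat).map (fun k : Nat => (k : Int)) := by
      rw [PySem.List.pyRange_one]
      have hlen : ((r + 1) / 6 + 1 - 1).toNat = ((r + 1) / 6).toNat := by omega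
      rw [hlen, List.range'_eq_map_range]
      simp [Function.comp]
    rw [hrange, List.map_map]
    have hmapeq : ((List.range' 1 ((r + 1) / 6).toNat).map
        ((fun n : Int => PySem.Int.floordiv (n * (3 * n - 1)) 2) ∘ (fun k : Nat => (k : Int)))) =
        (List.range' 1 ((r + 1) / 6).toNat).map pent := by
      apply List.map_congr_left
      intro k hk
      exact floordiv_pent k
    rw [hmapeq]
    have hnodup : ((List.range' 1 ((r + 1) / 6).toNat).map pent).Nodup :=
      (List.nodup_range').map (fun a b h => pent_strictMono.injective h)
    simp only [Nat.zero_add, Nat.sub_zero]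
    have hdisj : ∀ x ∈ (List.range' 1 ((r + 1) / 6).toNat).map pent,
        x ∉ (PySem.Set.ofList ([0] : List Int)) := by
      intro x hx
      obtain ⟨k, hk, rfl⟩ := List.mem_map.mp hx
      have hk1 : 1 ≤ k := (List.mem_range'_1.mp hk).1
      have : pent 0 < pent k := pent_strictMono (by omega)
      simp [PySem.Set.ofList, pent] at this ⊢
      omega
    exact (PySem.Set.update_eq_append_of_disjoint _ _ hnodup hdisj).symm
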